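-- pv_equiv track=rewrite | github.com/yescat1/BSCAMP | main.py | process
-- ===== SOURCE A (Python) =====
-- import itertools
--
-- def process(element, indexes, intervals):
--     keys, values = [], []
--     for i, j in itertools.product(indexes, indexes):
--         keys.append((i, j))
--     for pairX, pairY in itertools.product(intervals, intervals):
--         values.append((pairX, pairY))
--     result = list(zip(keys, values))
--     return result
-- ===== SOURCE B (Python) =====
-- def process(element, indexes, intervals):
--     idx = list(indexes)
--     itv = list(intervals)
--     ni, nj = len(idx), len(itv)
--     n = min(ni * ni, nj * nj)
--     return [((idx[k // ni], idx[k % ni]), (itv[k // nj], itv[k % nj]))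
--             for k in range(n)]
-- ===== Notes on version B (the rewrite author's own statement) =====
-- stated objective: faster
-- what changed: Instead of materializing both full cartesian products and zipping (truncating), B computes only the min(ni^2, nj^2) needed entries in one pass, fetching each entry directly by divmod index arithmetic.
import Mathlib
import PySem

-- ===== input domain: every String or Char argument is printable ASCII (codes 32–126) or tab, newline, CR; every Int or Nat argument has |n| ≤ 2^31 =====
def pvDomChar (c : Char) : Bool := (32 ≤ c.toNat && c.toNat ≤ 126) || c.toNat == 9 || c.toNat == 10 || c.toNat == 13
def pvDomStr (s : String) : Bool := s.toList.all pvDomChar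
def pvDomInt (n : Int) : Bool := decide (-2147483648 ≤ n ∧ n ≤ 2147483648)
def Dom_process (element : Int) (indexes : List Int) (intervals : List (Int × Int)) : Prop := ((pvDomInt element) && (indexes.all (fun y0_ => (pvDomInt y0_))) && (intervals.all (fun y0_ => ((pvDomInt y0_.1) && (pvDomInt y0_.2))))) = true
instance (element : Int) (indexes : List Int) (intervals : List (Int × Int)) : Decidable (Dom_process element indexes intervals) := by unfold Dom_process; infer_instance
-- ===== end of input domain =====

-- B replaces A's two fully-materialized cartesian products + zip by a single pass over
-- range(min(ni^2, nj^2)) computing each entry via divmod index arithmetic (objective: faster).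


-- ===== PORT A =====
-- keys := all (i,j) from product(indexes, indexes); values := all (x,y) from
-- product(intervals, intervals); result := zip keys values.
def process (element : Int) (indexes : List Int) (intervals : List (Int × Int)) : List ((Int × Int) × ((Int × Int) × (Int × Int))) :=
  let keys := indexes.flatMap (fun i => indexes.map (fun j => (i, j)))
  let values := intervals.flatMap (fun x => intervals.map (fun y => (x, y)))
  keys.zip values

-- ===== PORT B =====
-- one pass over range (min (ni*ni) (nj*nj)), each entry by divmod indexing
def process_alt (element : Int) (indexes : List Int) (intervals : List (Int × Int)) : List ((Int × Int) × ((Int × Int) × (Int × Int))) :=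
  let ni := indexes.length
  let nj := intervals.length
  let n := min (ni * ni) (nj * nj)
  (List.range n).map (fun k =>
    ((indexes.getD (k / ni) 0, indexes.getD (k % ni) 0),
     (intervals.getD (k / nj) (0, 0), intervals.getD (k % nj) (0, 0))))

-- ===== PRECONDITION & SPEC =====
def Spec_process (element : Int) (indexes : List Int) (intervals : List (Int × Int)) (out : List ((Int × Int) × ((Int × Int) × (Int × Int)))) : Prop := out = process_alt element indexes intervals
instance (element : Int) (indexes : List Int) (intervals : List (Int × Int)) (out : List ((Int × Int) × ((Int × Int) × (Int × Int)))) : Decidable (Spec_process element indexes intervals out) := by unfold Spec_process; infer_instance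

-- ===== CLAIM (what is proved, stated in full; the proofs are below) =====
def Claim_equal_process : Prop := ∀ (element : Int) (indexes : List Int) (intervals : List (Int × Int)), Dom_process element indexes intervals → Spec_process element indexes intervals (process element indexes intervals)

-- ===== LEMMAS AND PROOFS =====

-- a list written as a map over the range of its indices
theorem map_eq_map_range {α β : Type} (l : List α) (d : α) (f : α → β) :
    l.map f = (List.range l.length).map (fun k => f (l.getD k d)) := by
  apply List.ext_getElem
  · simp
  · intro i h1 h2
    simp [List.getD_eq_getElem?_getD, List.getElem?_eq_getElem (by simpa using h2)]

-- the cartesian product as a map over range (len₁ * len₂) with divmod indexing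
theorem prod_eq_range {α β : Type} (l₁ : List α) (l₂ : List β) (d₁ : α) (d₂ : β) :
    l₁.flatMap (fun i => l₂.map (fun j => (i, j)))
      = (List.range (l₁.length * l₂.length)).map
          (fun k => (l₁.getD (k / l₂.length) d₁, l₂.getD (k % l₂.length) d₂)) := by
  rcases Nat.eq_zero_or_pos l₂.length with hm | hm
  · rw [List.length_eq_zero_iff] at hm
    subst hm; simp
  · induction l₁ with
    | nil => simp
    | cons a l₁ ih =>
      have hsplit : (a :: l₁).length * l₂.length = l₂.length + l₁.length * l₂.length := by
        simp [Nat.succ_mul, Nat.add_comm]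
      rw [hsplit, List.range_add, List.map_append, List.flatMap_cons, ih]
      congr 1
      · rw [map_eq_map_range l₂ d₂ (fun j => (a, j))]
        apply List.map_congr_left
        intro k hk
        simp only [List.mem_range] at hk
        rw [Nat.div_eq_of_lt hk, Nat.mod_eq_of_lt hk]
        simp
      · rw [List.map_map]
        apply List.map_congr_left
        intro k _
        have hdiv : (l₂.length + k) / l₂.length = k / l₂.length + 1 := by
          rw [Nat.add_comm, Nat.add_div_right _ hm]
        have hmod : (l₂.length + k) % l₂.length = k % l₂.length := Nat.add_mod_left _ _
        simp [Function.comp, hdiv, hmod]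

-- zip of two maps over ranges
theorem zip_map_range {α β : Type} (a b : ℕ) (f : ℕ → α) (g : ℕ → β) :
    ((List.range a).map f).zip ((List.range b).map g)
      = (List.range (min a b)).map (fun k => (f k, g k)) := by
  apply List.ext_getElem
  · simp
  · intro i h1 h2
    simp

-- ===== VERDICT (by name: the statement is the Claim_ definition above) =====
theorem process_spec : Claim_equal_process := by
  intro element indexes intervals _
  show process element indexes intervals = process_alt element indexes intervals
  unfold process process_alt
  rw [prod_eq_range indexes indexes 0 0,
      prod_eq_range intervals intervals (0, 0) (0, 0),
      zip_map_range]
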